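-- pv_equiv track=rewrite | github.com/ElmerDaza/vigilantes_contable_1 | pyt/Recursos.py | codigo_clientes
-- ===== SOURCE A (Python) =====
-- def codigo_clientes(codigos_txt):
--     cad = ''
--     cadena = ''
--     codigos = []
--     for element in codigos_txt:
--         if(element == '0' or element == '1' or element == '2'
--                 or element == '3' or element == '4' or element == '5'
--                 or element == '6' or element == '7' or element == '8' or element == '9' or element == '-'):
--             cadena += element
--
--         elif(element == ',' or element == ';'):
--
--             codigos.append(cadena)
--             cadena = ''
--             cad = ''
--     return codigos
-- ===== SOURCE B (Python) =====
-- def codigo_clientes(codigos_txt):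
--     kept = [(',' if c in {',', ';'} else c)
--             for c in codigos_txt if c in {'0', '1', '2', '3', '4', '5', '6', '7', '8', '9', '-', ',', ';'}]
--     return ''.join(kept).split(',')[:-1]
-- ===== Notes on version B (the rewrite author's own statement) =====
-- stated objective: simpler
-- what changed: Replaced the per-character accumulate/flush state machine with a single filter-map pass (keep digits/'-'/separators, canonicalise ';' to ',') followed by one split that drops the trailing segment; the work moves from a Python-level loop with string += into C-level join/split.
import Mathlib
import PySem

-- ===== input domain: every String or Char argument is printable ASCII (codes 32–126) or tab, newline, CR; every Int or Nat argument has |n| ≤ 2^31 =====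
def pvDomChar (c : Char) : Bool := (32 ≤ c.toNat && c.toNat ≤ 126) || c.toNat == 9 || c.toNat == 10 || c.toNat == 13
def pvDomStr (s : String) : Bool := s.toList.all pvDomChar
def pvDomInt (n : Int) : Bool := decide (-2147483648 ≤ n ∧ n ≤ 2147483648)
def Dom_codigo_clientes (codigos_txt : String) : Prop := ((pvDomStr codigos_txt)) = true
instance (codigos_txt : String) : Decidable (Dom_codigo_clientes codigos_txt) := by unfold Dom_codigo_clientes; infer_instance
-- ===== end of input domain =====

-- B replaces A's per-character accumulate/flush state machine by a filter-map pass followed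
-- by a single split on ',' dropping the trailing segment; objective: simpler. Same return value.

-- ===== PORT A =====
-- A's loop: state (cad, cadena, codigos); strings are carried as List Char (String is opaque
-- to the kernel), each appended code becomes a String when pushed onto codigos.
def codigo_clientes_step (st : List Char × List Char × List String) (element : Char) :
    List Char × List Char × List String :=
  if element = '0' ∨ element = '1' ∨ element = '2'
      ∨ element = '3' ∨ element = '4' ∨ element = '5'
      ∨ element = '6' ∨ element = '7' ∨ element = '8' ∨ element = '9' ∨ element = '-' then
    (st.1, st.2.1 ++ [element], st.2.2)
  else if element = ',' ∨ element = ';' then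
    ([], [], st.2.2 ++ [String.mk st.2.1])
  else st

def codigo_clientes (codigos_txt : String) : List String :=
  (codigos_txt.toList.foldl codigo_clientes_step ([], [], [])).2.2

-- ===== PORT B =====
-- Source B: kept = [(',' if c in {',',';'} else c) for c in codigos_txt if c in {digits,'-',',',';'}]
--       return ''.join(kept).split(',')[:-1]
-- list-comprehension → filter + map; str.split(',') on a one-char separator → List.splitOn ','
-- (exact: Python keeps empty segments and ''.split(',') = [''] = splitOn of []); [:-1] → dropLast.
def codigo_clientes_alt (codigos_txt : String) : List String :=
  let kept := (codigos_txt.toList.filter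
      (fun c => c ∈ ['0','1','2','3','4','5','6','7','8','9','-',',',';'])).map
      (fun c => if c ∈ [',',';'] then ',' else c)
  ((kept.splitOn ',').map String.mk).dropLast

-- ===== PRECONDITION & SPEC =====
def Spec_codigo_clientes (codigos_txt : String) (out : List String) : Prop := out = codigo_clientes_alt codigos_txt
instance (codigos_txt : String) (out : List String) : Decidable (Spec_codigo_clientes codigos_txt out) := by unfold Spec_codigo_clientes; infer_instance

-- ===== CLAIM (what is proved, stated in full; the proofs are below) =====
def Claim_equal_codigo_clientes : Prop := ∀ (codigos_txt : String), Dom_codigo_clientes codigos_txt → Spec_codigo_clientes codigos_txt (codigo_clientes codigos_txt)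

-- ===== LEMMAS AND PROOFS =====

-- splitOnP over a prefix free of separators just extends the first segment
theorem splitOnP_sepfree_append (p : Char → Bool) (xs l : List Char)
    (h : ∀ c ∈ xs, p c = false) :
    List.splitOnP p (xs ++ l) = List.modifyHead (xs ++ ·) (List.splitOnP p l) := by
  induction xs with
  | nil =>
    cases hsp : List.splitOnP p l with
    | nil => exact absurd hsp (List.splitOnP_ne_nil p l)
    | cons a t => simp [hsp]
  | cons x xs ih =>
    have hx : p x = false := h x (by simp)
    have ih' := ih (fun c hc => h c (by simp [hc]))
    cases hsp : List.splitOnP p l with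
    | nil => exact absurd hsp (List.splitOnP_ne_nil p l)
    | cons a t =>
      simp [List.splitOnP_cons, hx, ih', hsp]

-- the loop invariant: for cadena free of kept-or-separator conflicts (no ',' ever enters cadena),
-- the fold equals the already-flushed codes plus the split of cadena ++ processed-rest, last dropped.
theorem codigo_clientes_loop (l : List Char) (cad cadena : List Char) (codigos : List String)
    (hc : ∀ c ∈ cadena, (c == ',') = false) :
    (l.foldl codigo_clientes_step (cad, cadena, codigos)).2.2
      = codigos ++
        (((cadena ++ (l.filter
              (fun c => c ∈ ['0','1','2','3','4','5','6','7','8','9','-',',',';'])).map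
              (fun c => if c ∈ [',',';'] then ',' else c)).splitOn ',').map String.mk).dropLast := by
  induction l generalizing cad cadena codigos with
  | nil =>
    have h1 : List.splitOnP (fun x => x == ',') cadena = [cadena] :=
      List.splitOnP_eq_single _ _ (fun x hx => by simp [hc x hx])
    simp [List.splitOn, h1]
  | cons c cs ih =>
    by_cases hk : c = '0' ∨ c = '1' ∨ c = '2' ∨ c = '3' ∨ c = '4' ∨ c = '5'
        ∨ c = '6' ∨ c = '7' ∨ c = '8' ∨ c = '9' ∨ c = '-'
    · -- kept digit / '-': goes into cadena
      have hmem : c ∈ ['0','1','2','3','4','5','6','7','8','9','-',',',';'] := by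
        rcases hk with h|h|h|h|h|h|h|h|h|h|h <;> simp [h]
      have hnc : (c == ',') = false := by
        rcases hk with h|h|h|h|h|h|h|h|h|h|h <;> simp [h]
      have hrep : (if c ∈ [',',';'] then ',' else c) = c := by
        rcases hk with h|h|h|h|h|h|h|h|h|h|h <;> simp [h]
      have hc' : ∀ x ∈ cadena ++ [c], (x == ',') = false := by
        intro x hx
        rcases List.mem_append.mp hx with h | h
        · exact hc x h
        · simp at h; simpa [h] using hnc
      simp only [List.foldl_cons, codigo_clientes_step, if_pos hk]
      rw [ih cad (cadena ++ [c]) codigos hc']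
      rw [List.filter_cons_of_pos (by simpa using hmem), List.map_cons, hrep,
        List.append_assoc, List.singleton_append]
    · by_cases hs : c = ',' ∨ c = ';'
      · -- separator: flush
        have hmem : c ∈ ['0','1','2','3','4','5','6','7','8','9','-',',',';'] := by
          rcases hs with h|h <;> simp [h]
        have hrep : (if c ∈ [',',';'] then ',' else c) = ',' := by
          rcases hs with h|h <;> simp [h]
        simp only [List.foldl_cons, codigo_clientes_step, if_neg hk, if_pos hs]
        rw [ih [] [] (codigos ++ [String.mk cadena]) (by simp)]
        have hsf : ∀ x ∈ cadena, ((x == ',') : Bool) = false := hc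
        simp only [List.filter_cons, hmem, decide_true, if_true, List.map_cons, hrep]
        simp only [List.splitOn]
        rw [splitOnP_sepfree_append _ cadena _ hsf]
        cases hsp : List.splitOnP (fun x => x == ',') (','
            :: (cs.filter (fun c => c ∈ ['0','1','2','3','4','5','6','7','8','9','-',',',';'])).map
               (fun c => if c ∈ [',',';'] then ',' else c)) with
        | nil => exact absurd hsp (List.splitOnP_ne_nil _ _)
        | cons a t =>
          have : a = [] ∧ t = List.splitOnP (fun x => x == ',')
              ((cs.filter (fun c => c ∈ ['0','1','2','3','4','5','6','7','8','9','-',',',';'])).map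
               (fun c => if c ∈ [',',';'] then ',' else c)) := by
            rw [List.splitOnP_cons] at hsp
            simp at hsp
            constructor <;> simp_all
          obtain ⟨ha, ht⟩ := this
          subst ha
          have htne : t ≠ [] := by rw [ht]; exact List.splitOnP_ne_nil _ _
          cases t with
          | nil => exact absurd rfl htne
          | cons b u =>
            simp only [List.nil_append]
            rw [← ht]
            simp
      · -- other char: dropped by both
        have hmem : c ∉ ['0','1','2','3','4','5','6','7','8','9','-',',',';'] := by
          intro h
          simp only [List.mem_cons, List.not_mem_nil, or_false] at h
          rcases h with h|h|h|h|h|h|h|h|h|h|h|h|h <;> first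
            | exact hk (by tauto)
            | exact hs (by tauto)
        simp only [List.foldl_cons, codigo_clientes_step, if_neg hk, if_neg hs]
        rw [ih cad cadena codigos hc]
        rw [List.filter_cons_of_neg (by simpa using hmem)]

-- ===== VERDICT (by name: the statement is the Claim_ definition above) =====
theorem codigo_clientes_spec : Claim_equal_codigo_clientes := by
  intro s _
  unfold Spec_codigo_clientes codigo_clientes codigo_clientes_alt
  rw [codigo_clientes_loop s.toList [] [] [] (by simp)]
  simp
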